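-- pv_equiv track=rewrite | github.com/srushtibasavaraddi/Day-to-day-codes | rebit.py | solve
-- ===== SOURCE A (Python) =====
-- orr=[[(0,0)],[(0,1),(1,0),(1,2),(2,1),(1,3),(3,1),(3,2),(2,3),(1,1)],[(0,2),(2,0),(2,2)],[(0,3),(3,0),(3,3)]]
--
-- andd=[[(0,0),(0,1),(1,0),(0,3),(3,0),(2,0),(0,2),(2,3),(3,2)],[(1,1)],[(2,1),(1,2),(2,2)],[(3,1),(1,3),(3,3)]]
--
-- xorr=[[(0,0),(1,1),(2,2),(3,3)],[(1,0),(3,2),(2,3),(0,1)],[(0,2),(2,0),(1,3),(3,1)],[(0,3),(3,0),(1,2),(2,1)]]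
--
-- def solve(a,b,o):
--     r=[]
--     if(o=='|'):
--         arr=orr
--     elif(o=="&"):
--         arr=andd
--     else:
--         arr=xorr
--     for j in range(4):
--         temp=0
--         for i in arr[j]:
--             temp+=a[i[0]]*b[i[1]]
--         r.append(temp)
--     return r
-- ===== SOURCE B (Python) =====
-- # B: loop-free closed forms. Each output is a factored arithmetic formula
-- # (Karatsuba-style products of sums), derived once from the pair tables;
-- # no tables or loops at run time.
-- def solve(a, b, o):
--     a0, a1, a2, a3 = a[0], a[1], a[2], a[3]
--     b0, b1, b2, b3 = b[0], b[1], b[2], b[3]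
--     if o == '|':
--         return [a0 * b0,
--                 a1 * (b0 + b1 + b2 + b3) + (a0 + a2 + a3) * b1 + a3 * b2 + a2 * b3,
--                 (a0 + a2) * (b0 + b2) - a0 * b0,
--                 (a0 + a3) * (b0 + b3) - a0 * b0]
--     if o == '&':
--         return [a0 * (b0 + b1 + b2 + b3) + (a1 + a2 + a3) * b0 + a2 * b3 + a3 * b2,
--                 a1 * b1,
--                 (a1 + a2) * (b1 + b2) - a1 * b1,
--                 (a1 + a3) * (b1 + b3) - a1 * b1]
--     p0, p1, p2, p3 = a0 * b0, a1 * b1, a2 * b2, a3 * b3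
--     return [p0 + p1 + p2 + p3,
--             (a0 + a1) * (b0 + b1) - p0 - p1 + (a2 + a3) * (b2 + b3) - p2 - p3,
--             (a0 + a2) * (b0 + b2) - p0 - p2 + (a1 + a3) * (b1 + b3) - p1 - p3,
--             (a0 + a3) * (b0 + b3) - p0 - p3 + (a1 + a2) * (b1 + b2) - p1 - p2]
-- ===== Notes on version B (the rewrite author's own statement) =====
-- stated objective: alternative
-- what changed: B drops A's pair-group tables and loops entirely: each of the four outputs is a straight-line factored closed form (Karatsuba-style products of sums, e.g. (a0+a2)*(b0+b2)-a0*b0), derived once from the tables, cutting 16 multiplications to at most 11.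
import Mathlib
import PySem

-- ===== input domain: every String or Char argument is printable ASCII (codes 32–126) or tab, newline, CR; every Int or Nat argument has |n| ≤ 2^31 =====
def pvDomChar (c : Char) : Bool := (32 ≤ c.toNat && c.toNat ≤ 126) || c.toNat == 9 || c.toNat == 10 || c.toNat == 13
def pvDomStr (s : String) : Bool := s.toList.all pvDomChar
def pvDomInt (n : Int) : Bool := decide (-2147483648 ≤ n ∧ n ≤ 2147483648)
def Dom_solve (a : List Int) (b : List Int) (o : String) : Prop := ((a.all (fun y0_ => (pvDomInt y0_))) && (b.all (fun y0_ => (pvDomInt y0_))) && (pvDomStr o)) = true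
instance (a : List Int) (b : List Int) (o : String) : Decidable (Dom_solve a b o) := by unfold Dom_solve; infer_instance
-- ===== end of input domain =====

-- B replaces A's loops over hand-listed pair tables by straight-line factored closed
-- forms per output (objective: alternative, same asymptotic cost, fewer multiplications).
-- Equivalence of the RETURN value on lists of length ≥ 4 (Pre_); A raises IndexError on shorter lists.

-- ===== PORT A =====
def pvOrr : List (List (Int × Int)) :=
  [[(0,0)],[(0,1),(1,0),(1,2),(2,1),(1,3),(3,1),(3,2),(2,3),(1,1)],[(0,2),(2,0),(2,2)],[(0,3),(3,0),(3,3)]]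
def pvAndd : List (List (Int × Int)) :=
  [[(0,0),(0,1),(1,0),(0,3),(3,0),(2,0),(0,2),(2,3),(3,2)],[(1,1)],[(2,1),(1,2),(2,2)],[(3,1),(1,3),(3,3)]]
def pvXorr : List (List (Int × Int)) :=
  [[(0,0),(1,1),(2,2),(3,3)],[(1,0),(3,2),(2,3),(0,1)],[(0,2),(2,0),(1,3),(3,1)],[(0,3),(3,0),(1,2),(2,1)]]

-- a[i] (Pre_ guarantees the index is in range, so the .getD default is never consulted)
def pvAt (xs : List Int) (i : Int) : Int := PySem.List.pyGetD xs i 0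

def solve (a : List Int) (b : List Int) (o : String) : List Int :=
  let arr := if o = "|" then pvOrr else if o = "&" then pvAndd else pvXorr
  (PySem.List.pyRange 0 4 1).foldl (fun r j =>
    let temp := ((PySem.List.pyGet? arr j).getD []).foldl
      (fun temp i => temp + pvAt a i.1 * pvAt b i.2) 0
    r ++ [temp]) []

-- ===== PORT B =====
-- a[0]..a[3] on B's side (Pre_ guarantees length ≥ 4, so the default is never consulted)
def pvAtB (xs : List Int) (i : Int) : Int := PySem.List.pyGetD xs i 0

def solve_alt (a : List Int) (b : List Int) (o : String) : List Int :=
  let a0 := pvAtB a 0; let a1 := pvAtB a 1; let a2 := pvAtB a 2; let a3 := pvAtB a 3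
  let b0 := pvAtB b 0; let b1 := pvAtB b 1; let b2 := pvAtB b 2; let b3 := pvAtB b 3
  if o = "|" then
    [a0 * b0,
     a1 * (b0 + b1 + b2 + b3) + (a0 + a2 + a3) * b1 + a3 * b2 + a2 * b3,
     (a0 + a2) * (b0 + b2) - a0 * b0,
     (a0 + a3) * (b0 + b3) - a0 * b0]
  else if o = "&" then
    [a0 * (b0 + b1 + b2 + b3) + (a1 + a2 + a3) * b0 + a2 * b3 + a3 * b2,
     a1 * b1,
     (a1 + a2) * (b1 + b2) - a1 * b1,
     (a1 + a3) * (b1 + b3) - a1 * b1]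
  else
    let p0 := a0 * b0; let p1 := a1 * b1; let p2 := a2 * b2; let p3 := a3 * b3
    [p0 + p1 + p2 + p3,
     (a0 + a1) * (b0 + b1) - p0 - p1 + (a2 + a3) * (b2 + b3) - p2 - p3,
     (a0 + a2) * (b0 + b2) - p0 - p2 + (a1 + a3) * (b1 + b3) - p1 - p3,
     (a0 + a3) * (b0 + b3) - p0 - p3 + (a1 + a2) * (b1 + b2) - p1 - p2]

-- ===== PRECONDITION & SPEC =====
-- Pre_: A indexes a[0..3] and b[0..3] and raises IndexError when either list is shorter.
def Pre_solve (a : List Int) (b : List Int) (o : String) : Prop := 4 ≤ a.length ∧ 4 ≤ b.length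
instance (a : List Int) (b : List Int) (o : String) : Decidable (Pre_solve a b o) := by unfold Pre_solve; infer_instance
def pvWitness_solve : List Int × List Int × String := ([1,2,3,4], [5,6,7,8], "|")

def Spec_solve (a : List Int) (b : List Int) (o : String) (out : List Int) : Prop := out = solve_alt a b o
instance (a : List Int) (b : List Int) (o : String) (out : List Int) : Decidable (Spec_solve a b o out) := by unfold Spec_solve; infer_instance

-- ===== CLAIM (what is proved, stated in full; the proofs are below) =====
def Claim_equal_solve : Prop := ∀ (a : List Int) (b : List Int) (o : String), Dom_solve a b o → Pre_solve a b o → Spec_solve a b o (solve a b o)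

-- ===== LEMMAS AND PROOFS =====

set_option maxHeartbeats 1600000 in
theorem pvRange4 : PySem.List.pyRange 0 4 1 = [0,1,2,3] := by decide

set_option maxHeartbeats 1600000 in
theorem solve_eq_core (a0 a1 a2 a3 b0 b1 b2 b3 : Int) (ta tb : List Int) (o : String) :
    solve (a0::a1::a2::a3::ta) (b0::b1::b2::b3::tb) o
      = solve_alt (a0::a1::a2::a3::ta) (b0::b1::b2::b3::tb) o := by
  by_cases h1 : o = "|" <;> by_cases h2 : o = "&" <;>
    simp [solve, solve_alt, h1, h2, pvOrr, pvAndd, pvXorr, pvAt, pvAtB,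
      pvRange4, List.foldl, PySem.List.pyGetD_ofNat'] <;> ring_nf <;> simp <;> try ring_nf

-- ===== VERDICT (by name: the statement is the Claim_ definition above) =====
theorem solve_spec : Claim_equal_solve := by
  intro a b o _ hpre
  obtain ⟨ha, hb⟩ := hpre
  match a, ha with
  | a0::a1::a2::a3::ta, _ =>
    match b, hb with
    | b0::b1::b2::b3::tb, _ =>
      exact solve_eq_core a0 a1 a2 a3 b0 b1 b2 b3 ta tb o
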